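-- pv_equiv track=rewrite | github.com/rgit/ruotvet | ruotvet/otvetmail/parser/parse.py | prepare_question
-- ===== SOURCE A (Python) =====
-- import string
--
-- def prepare_question(text: str) -> str:
--     output = []
--     for word in text.split():
--         prepared_word = ""
--         for char in word:
--             if char not in string.punctuation:
--                 prepared_word += char
--         if prepared_word != "":
--             output.append(prepared_word)
--     return " ".join(output).capitalize()
-- ===== SOURCE B (Python) =====
-- import string
--
-- def prepare_question(text: str) -> str:
--     out = []
--     started = False
--     sep = False
--     for ch in text:
--         if ch in string.punctuation:
--             continue
--         if ch.isspace():
--             sep = started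
--             continue
--         if sep:
--             out.append(' ')
--         out.append(ch.lower() if started else ch.upper())
--         started = True
--         sep = False
--     return ''.join(out)
-- ===== Notes on version B (the rewrite author's own statement) =====
-- stated objective: alternative
-- what changed: Replaces A's split-into-words / filter-each-word / rejoin / capitalize pipeline with a single left-to-right character scan that tracks two flags (word started, separator pending) and emits the correctly-cased characters directly, never materialising word lists or an intermediate joined string.
import Mathlib
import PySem

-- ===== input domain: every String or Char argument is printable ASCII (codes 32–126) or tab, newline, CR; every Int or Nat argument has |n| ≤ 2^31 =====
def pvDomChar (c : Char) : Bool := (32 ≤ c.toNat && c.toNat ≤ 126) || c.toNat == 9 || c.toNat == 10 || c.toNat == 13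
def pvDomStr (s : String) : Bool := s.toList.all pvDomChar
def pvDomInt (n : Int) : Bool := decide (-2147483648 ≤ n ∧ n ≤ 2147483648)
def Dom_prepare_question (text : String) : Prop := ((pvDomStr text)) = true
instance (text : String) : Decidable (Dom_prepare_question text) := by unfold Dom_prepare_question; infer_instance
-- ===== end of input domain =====

-- B replaces A's split/filter-each-word/join/capitalize pipeline with a single
-- character scan carrying two flags (word started, separator pending); return value identical.

-- string.punctuation (the 32 ASCII punctuation characters)
def pvPunct : List Char :=
  ['!', '"', '#', '$', '%', '&', '\'', '(', ')', '*', '+', ',', '-', '.', '/',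
   ':', ';', '<', '=', '>', '?', '@', '[', '\\', ']', '^', '_', '`', '{', '|', '}', '~']

-- 'char not in string.punctuation' in A
def pvKeep (c : Char) : Bool := !pvPunct.contains c

-- str.capitalize: first character uppercased, the rest lowercased (exact on ASCII)
def pvCapitalize (cs : List Char) : List Char :=
  match cs with
  | [] => []
  | c :: rest => PySem.Chars.upperChar c :: rest.map PySem.Chars.lowerChar

-- ===== PORT A =====
def prepare_question (text : String) : String :=
  let output : List (List Char) :=
    (PySem.Chars.split₀ text.toList).foldl (fun output word =>
      let prepared_word : List Char :=
        word.foldl (fun pw c => if pvKeep c then pw ++ [c] else pw) []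
      if prepared_word ≠ [] then output ++ [prepared_word] else output) []
  String.ofList (pvCapitalize (PySem.Chars.join [' '] output))

-- ===== PORT B =====
-- loop body of B (state: output chars so far, started, sep)
def pvStep (st : List Char × Bool × Bool) (ch : Char) : List Char × Bool × Bool :=
  if pvPunct.contains ch then st
  else if PySem.Chars.isspace ch then (st.1, st.2.1, st.2.1)
  else (st.1 ++ (if st.2.2 then [' '] else [])
             ++ [if st.2.1 then PySem.Chars.lowerChar ch else PySem.Chars.upperChar ch],
        true, false)

def prepare_question_alt (text : String) : String :=
  String.ofList (text.toList.foldl pvStep ([], false, false)).1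

-- ===== PRECONDITION & SPEC =====
def Spec_prepare_question (text : String) (out : String) : Prop := out = prepare_question_alt text
instance (text : String) (out : String) : Decidable (Spec_prepare_question text out) := by unfold Spec_prepare_question; infer_instance

-- ===== CLAIM (what is proved, stated in full; the proofs are below) =====
def Claim_equal_prepare_question : Prop := ∀ (text : String), Dom_prepare_question text → Spec_prepare_question text (prepare_question text)

-- ===== LEMMAS AND PROOFS =====

-- proof-level recursive form of B's loop
def pqScan : List Char → Bool → Bool → List Char
  | [], _, _ => []
  | c :: rest, started, sep =>
    if pvPunct.contains c then pqScan rest started sep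
    else if PySem.Chars.isspace c then pqScan rest started started
    else (if sep then [' '] else [])
           ++ (if started then PySem.Chars.lowerChar c else PySem.Chars.upperChar c)
             :: pqScan rest true false

-- ' ' separator then lowercased word, per word
def pvTail (ws : List (List Char)) : List Char :=
  ws.flatMap (fun w => ' ' :: w.map PySem.Chars.lowerChar)

lemma pvPunct_not_space : ∀ c ∈ pvPunct, PySem.Chars.isspace c = false := by
  intro c hc
  fin_cases hc <;> rfl

lemma pvKeep_of_space {c : Char} (h : PySem.Chars.isspace c = true) : pvKeep c = true := by
  unfold pvKeep
  by_contra hc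
  simp only [Bool.not_eq_true] at hc
  have := pvPunct_not_space c (by simpa using hc)
  simp [this] at h

-- A's inner loop filters its word
lemma pvInner :
    (fun (w : List Char) => w.foldl (fun pw c => if pvKeep c then pw ++ [c] else pw) [])
    = fun (w : List Char) => w.filter pvKeep := by
  funext w
  simpa using PySem.List.foldl_append_if pvKeep id w []

-- A's outer loop collects the nonempty results of g
lemma pvCollect (g : List Char → List Char) (ws : List (List Char)) (acc : List (List Char)) :
    ws.foldl (fun out w => if g w ≠ [] then out ++ [g w] else out) acc
    = acc ++ ((ws.map g).filter (fun w => !w.isEmpty)) := by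
  induction ws generalizing acc with
  | nil => simp
  | cons w ws ih =>
    rw [List.foldl_cons]
    by_cases h : g w = []
    · rw [if_neg (fun hn => hn h), ih]
      simp [h]
    · rw [if_pos h, ih]
      simp [h]

-- split₀.go ignores its accumulator up to prepending
lemma pvGoAcc (s : List Char) : ∀ (cur : List Char) (acc : List (List Char)),
    PySem.Chars.split₀.go s cur acc = acc.reverse ++ PySem.Chars.split₀.go s cur [] := by
  induction s with
  | nil =>
    intro cur acc
    by_cases hc : cur.isEmpty = true <;> simp [PySem.Chars.split₀.go, hc]
  | cons c rest ih =>
    intro cur acc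
    by_cases hs : PySem.Chars.isspace c = true
    · by_cases hc : cur.isEmpty = true
      · simp only [PySem.Chars.split₀.go, hs, hc]
        exact ih [] acc
      · simp only [PySem.Chars.split₀.go, hs, hc, Bool.false_eq_true, if_false]
        rw [ih [] (cur.reverse :: acc), ih [] [cur.reverse]]
        simp
    · have hs' : PySem.Chars.isspace c = false := by simpa using hs
      simp only [PySem.Chars.split₀.go, hs', Bool.false_eq_true, if_false]
      exact ih (c :: cur) acc

-- one-step unfoldings of split₀.go
lemma pvGoNil (cur : List Char) (acc : List (List Char)) :
    PySem.Chars.split₀.go [] cur acc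
    = if cur.isEmpty then acc.reverse else (cur.reverse :: acc).reverse := rfl

lemma pvGoCons (c : Char) (rest cur : List Char) (acc : List (List Char)) :
    PySem.Chars.split₀.go (c :: rest) cur acc
    = if PySem.Chars.isspace c then
        (if cur.isEmpty then PySem.Chars.split₀.go rest [] acc
         else PySem.Chars.split₀.go rest [] (cur.reverse :: acc))
      else PySem.Chars.split₀.go rest (c :: cur) acc := rfl

-- filter-then-split equals split-then-filter-each-word-and-drop-empties,
-- because every whitespace character is kept by pvKeep
lemma pvGo (s : List Char) : ∀ (cur : List Char),
    PySem.Chars.split₀.go (s.filter pvKeep) (cur.filter pvKeep) []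
    = ((PySem.Chars.split₀.go s cur []).map (fun w => w.filter pvKeep)).filter
        (fun w => !w.isEmpty) := by
  induction s with
  | nil =>
    intro cur
    rw [List.filter_nil, pvGoNil, pvGoNil]
    by_cases hf : cur.filter pvKeep = []
    · by_cases hc : cur = [] <;>
        simp [hc, hf, List.filter_reverse, List.isEmpty_iff]
    · have hc : cur ≠ [] := fun h => hf (by simp [h])
      simp [hc, hf, List.filter_reverse, List.isEmpty_iff]
  | cons c rest ih =>
    intro cur
    by_cases hs : PySem.Chars.isspace c = true
    · have hk : pvKeep c = true := pvKeep_of_space hs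
      rw [List.filter_cons, if_pos hk, pvGoCons, pvGoCons, if_pos hs, if_pos hs]
      by_cases hc : cur = []
      · rw [hc]
        simp only [List.filter_nil, List.isEmpty_nil]
        have hih := ih ([] : List Char)
        rwa [List.filter_nil] at hih
      · have hne : cur.isEmpty = false := by simpa [List.isEmpty_iff] using hc
        rw [hne]
        simp only [Bool.false_eq_true, if_false]
        by_cases hf : cur.filter pvKeep = []
        · have hfe : (cur.filter pvKeep).isEmpty = true := by simp [hf]
          rw [hfe, if_pos rfl, pvGoAcc rest [] [cur.reverse]]
          have hih := ih ([] : List Char)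
          rw [List.filter_nil] at hih
          simp [hih, List.filter_reverse, hf]
        · have hfe : (cur.filter pvKeep).isEmpty = false := by
            simpa [List.isEmpty_iff] using hf
          rw [hfe]
          simp only [Bool.false_eq_true, if_false]
          rw [pvGoAcc rest [] [cur.reverse],
            pvGoAcc (rest.filter pvKeep) [] [(cur.filter pvKeep).reverse]]
          have hih := ih ([] : List Char)
          rw [List.filter_nil] at hih
          simp [hih, List.filter_reverse, hf]
    · have hs' : PySem.Chars.isspace c = false := by simpa using hs
      rw [List.filter_cons]
      by_cases hk : pvKeep c = true
      · rw [if_pos hk, pvGoCons, pvGoCons, hs']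
        simp only [Bool.false_eq_true, if_false]
        have hcc : (c :: cur).filter pvKeep = c :: cur.filter pvKeep := by
          rw [List.filter_cons, if_pos hk]
        rw [← hcc]
        exact ih (c :: cur)
      · have hk' : pvKeep c = false := by simpa using hk
        rw [hk']
        simp only [Bool.false_eq_true, if_false]
        rw [pvGoCons, hs']
        simp only [Bool.false_eq_true, if_false]
        have hcc : (c :: cur).filter pvKeep = cur.filter pvKeep := by
          rw [List.filter_cons, hk']
          simp
        rw [← hcc]
        exact ih (c :: cur)

-- A in normal form: capitalize (join ' ' (split₀ (filter pvKeep text)))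
lemma pvA_norm (text : String) :
    prepare_question text
    = String.ofList (pvCapitalize (PySem.Chars.join [' ']
        (PySem.Chars.split₀ (text.toList.filter pvKeep)))) := by
  unfold prepare_question
  simp only []
  rw [pvCollect (fun w => w.foldl (fun pw c => if pvKeep c then pw ++ [c] else pw) []),
    pvInner, List.nil_append]
  have h2 := pvGo text.toList ([] : List Char)
  simp only [List.filter_nil] at h2
  unfold PySem.Chars.split₀
  rw [h2]

-- B's foldl accumulates exactly pqScan
lemma pvFoldl (s : List Char) : ∀ (out : List Char) (started sep : Bool),
    (s.foldl pvStep (out, started, sep)).1 = out ++ pqScan s started sep := by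
  induction s with
  | nil => intro out started sep; simp [pqScan]
  | cons c rest ih =>
    intro out started sep
    rw [List.foldl_cons]
    by_cases hp : pvPunct.contains c = true
    · simp only [pvStep, pqScan, hp, if_pos]
      exact ih out started sep
    · have hp' : pvPunct.contains c = false := by simpa using hp
      by_cases hs : PySem.Chars.isspace c = true
      · simp only [pvStep, pqScan, hp', hs, Bool.false_eq_true, if_false, if_pos]
        exact ih out started started
      · have hs' : PySem.Chars.isspace c = false := by simpa using hs
        simp only [pvStep, pqScan, hp', hs', Bool.false_eq_true, if_false]
        rw [ih]
        simp

-- punctuation characters can be filtered out up front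
lemma pqScan_filter (s : List Char) : ∀ (started sep : Bool),
    pqScan s started sep = pqScan (s.filter pvKeep) started sep := by
  induction s with
  | nil => intro _ _; rfl
  | cons c rest ih =>
    intro started sep
    rw [List.filter_cons]
    by_cases hk : pvKeep c = true
    · have hp : pvPunct.contains c = false := by
        have := hk; unfold pvKeep at this; simpa using this
      rw [if_pos hk]
      simp only [pqScan, hp, Bool.false_eq_true, if_false]
      by_cases hs : PySem.Chars.isspace c = true
      · rw [if_pos hs, if_pos hs, ih]
      · have hs' : PySem.Chars.isspace c = false := by simpa using hs
        rw [hs']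
        simp only [Bool.false_eq_true, if_false]
        rw [ih]
    · have hk' : pvKeep c = false := by simpa using hk
      have hp : pvPunct.contains c = true := by
        unfold pvKeep at hk'; simpa using hk'
      rw [hk']
      simp only [Bool.false_eq_true, if_false, pqScan, hp, if_pos]
      exact ih started sep

lemma pvLowerSpace : PySem.Chars.lowerChar ' ' = ' ' := by decide

-- pvTail of a nonempty word list is a space then the lowercased join
lemma pvTail_join (t : List Char) (ts : List (List Char)) :
    pvTail (t :: ts) = ' ' :: (PySem.Chars.join [' '] (t :: ts)).map PySem.Chars.lowerChar := by
  induction ts generalizing t with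
  | nil => simp [pvTail, PySem.Chars.join_singleton]
  | cons q ts ih =>
    rw [PySem.Chars.join_cons_cons]
    have : pvTail (t :: q :: ts) = ' ' :: t.map PySem.Chars.lowerChar ++ pvTail (q :: ts) := by
      simp [pvTail]
    rw [this, ih q]
    simp [pvLowerSpace]

-- first token of split₀.go with nonempty cur starts with cur.reverse
lemma pvGoHead (s : List Char) : ∀ (cur : List Char), cur ≠ [] →
    ∃ w ts, PySem.Chars.split₀.go s cur [] = (cur.reverse ++ w) :: ts := by
  induction s with
  | nil =>
    intro cur hc
    have : cur.isEmpty = false := by simpa [List.isEmpty_iff] using hc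
    exact ⟨[], [], by rw [pvGoNil, this]; simp⟩
  | cons c rest ih =>
    intro cur hc
    by_cases hs : PySem.Chars.isspace c = true
    · have hne : cur.isEmpty = false := by simpa [List.isEmpty_iff] using hc
      rw [pvGoCons, if_pos hs, hne]
      simp only [Bool.false_eq_true, if_false]
      rw [pvGoAcc rest [] [cur.reverse]]
      exact ⟨[], PySem.Chars.split₀.go rest [] [], by simp⟩
    · have hs' : PySem.Chars.isspace c = false := by simpa using hs
      rw [pvGoCons, hs']
      simp only [Bool.false_eq_true, if_false]
      obtain ⟨w, ts, hw⟩ := ih (c :: cur) (by simp)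
      exact ⟨c :: w, ts, by rw [hw]; simp⟩

-- a join whose first token starts with c starts with c
lemma pvJoinHead (c : Char) (w : List Char) (ts : List (List Char)) :
    ∃ ds, PySem.Chars.join [' '] ((c :: w) :: ts) = c :: ds := by
  cases ts with
  | nil => exact ⟨w, by rw [PySem.Chars.join_singleton]⟩
  | cons q ts => exact ⟨w ++ ' ' :: PySem.Chars.join [' '] (q :: ts),
      by rw [PySem.Chars.join_cons_cons]; simp⟩

-- central invariant: the scan in states (true,true) / mid-word (true,false)
-- produces the lowercased space-separated tail of the remaining tokenisation
lemma pvGT (s : List Char) : ∀ (cur : List Char), (∀ c ∈ s, pvKeep c = true) →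
    pvTail (PySem.Chars.split₀.go s cur [])
    = if cur = [] then pqScan s true true
      else ' ' :: cur.reverse.map PySem.Chars.lowerChar ++ pqScan s true false := by
  induction s with
  | nil =>
    intro cur _
    by_cases hc : cur = []
    · simp [hc, pvGoNil, pvTail, pqScan]
    · have hne : cur.isEmpty = false := by simpa [List.isEmpty_iff] using hc
      rw [pvGoNil, hne]
      simp [hc, pvTail, pqScan]
  | cons c rest ih =>
    intro cur hall
    have hk : pvKeep c = true := hall c (by simp)
    have hp : pvPunct.contains c = false := by unfold pvKeep at hk; simpa using hk
    have hnp : c ∉ pvPunct := by simpa using hp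
    have hrest : ∀ x ∈ rest, pvKeep x = true := fun x hx => hall x (by simp [hx])
    by_cases hs : PySem.Chars.isspace c = true
    · by_cases hc : cur = []
      · rw [hc, pvGoCons, if_pos hs]
        simp only [List.isEmpty_nil, if_pos]
        rw [ih [] hrest]
        simp [pqScan, hnp, hs]
      · have hne : cur.isEmpty = false := by simpa [List.isEmpty_iff] using hc
        rw [pvGoCons, if_pos hs, hne]
        simp only [Bool.false_eq_true, if_false]
        rw [pvGoAcc rest [] [cur.reverse]]
        have : pvTail (cur.reverse :: PySem.Chars.split₀.go rest [] [])
            = ' ' :: cur.reverse.map PySem.Chars.lowerChar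
              ++ pvTail (PySem.Chars.split₀.go rest [] []) := by
          simp [pvTail]
        rw [List.reverse_singleton, List.singleton_append, this, ih [] hrest]
        simp [hc, pqScan, hnp, hs]
    · have hs' : PySem.Chars.isspace c = false := by simpa using hs
      rw [pvGoCons, hs']
      simp only [Bool.false_eq_true, if_false]
      rw [ih (c :: cur) hrest]
      simp only [reduceCtorEq, if_false]
      by_cases hc : cur = []
      · simp [hc, pqScan, hnp, hs']
      · simp [hc, pqScan, hnp, hs']

-- the scan from the initial state computes capitalize (join ' ' (split₀ s)),
-- for punctuation-free s
lemma pvF (s : List Char) (hall : ∀ c ∈ s, pvKeep c = true) :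
    pqScan s false false
    = pvCapitalize (PySem.Chars.join [' '] (PySem.Chars.split₀.go s [] [])) := by
  induction s with
  | nil => simp [pqScan, pvGoNil, PySem.Chars.join_nil, pvCapitalize]
  | cons c rest ih =>
    have hk : pvKeep c = true := hall c (by simp)
    have hp : pvPunct.contains c = false := by unfold pvKeep at hk; simpa using hk
    have hnp : c ∉ pvPunct := by simpa using hp
    have hrest : ∀ x ∈ rest, pvKeep x = true := fun x hx => hall x (by simp [hx])
    by_cases hs : PySem.Chars.isspace c = true
    · rw [pvGoCons, if_pos hs]
      simp only [List.isEmpty_nil, if_pos]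
      rw [← ih hrest]
      simp [pqScan, hnp, hs]
    · have hs' : PySem.Chars.isspace c = false := by simpa using hs
      rw [pvGoCons, hs']
      simp only [Bool.false_eq_true, if_false]
      obtain ⟨w, ts, hw⟩ := pvGoHead rest [c] (by simp)
      rw [List.reverse_singleton, List.singleton_append] at hw
      obtain ⟨ds, hd⟩ := pvJoinHead c w ts
      have hgt := pvGT rest [c] hrest
      simp only [reduceCtorEq, if_false] at hgt
      rw [hw, pvTail_join, hd] at hgt
      have hds : ds.map PySem.Chars.lowerChar = pqScan rest true false := by
        simpa [pvLowerSpace] using hgt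
      rw [hw, hd]
      simp [pqScan, hnp, hs', pvCapitalize, hds]

-- ===== VERDICT (by name: the statement is the Claim_ definition above) =====
theorem prepare_question_spec : Claim_equal_prepare_question := by
  intro text _
  unfold Spec_prepare_question
  rw [pvA_norm]
  unfold prepare_question_alt
  rw [pvFoldl text.toList [] false false, List.nil_append, pqScan_filter]
  have hall : ∀ c ∈ text.toList.filter pvKeep, pvKeep c = true :=
    fun c hc => (List.mem_filter.mp hc).2
  rw [pvF _ hall]
  unfold PySem.Chars.split₀
  rfl
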